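-- pv_equiv track=rewrite | github.com/aws/amazon-freertos | tools/cbmc/proofs/common_makefile.py | patch_path_separator
-- ===== SOURCE A (Python) =====
-- platform_definitions = {
--     "linux": {
--         "platform": "linux",
--         "separator": "/",
--         "define": "-D",
--         "include": "-I",
--     },
--     "macos": {
--         "platform": "darwin",
--         "separator": "/",
--         "define": "-D",
--         "include": "-I",
--     },
--     "windows": {
--         "platform": "win32",
--         "separator": "\\",
--         "define": "/D",
--         "include": "/I",
--     },
-- }
--
-- def patch_path_separator(opsys, string):
--     from_separator = '/'
--     to_separator = platform_definitions[opsys]["separator"]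
--
--     def escape_separator(string):
--         return string.split(from_separator + from_separator)
--
--     def change_separator(string):
--         return string.replace(from_separator, to_separator)
--
--     return from_separator.join([change_separator(escaped)
--                                 for escaped in escape_separator(string)])
-- ===== SOURCE B (Python) =====
-- platform_definitions = {
--     "linux": {
--         "platform": "linux",
--         "separator": "/",
--         "define": "-D",
--         "include": "-I",
--     },
--     "macos": {
--         "platform": "darwin",
--         "separator": "/",
--         "define": "-D",
--         "include": "-I",
--     },
--     "windows": {
--         "platform": "win32",
--         "separator": "\\",
--         "define": "/D",
--         "include": "/I",
--     },
-- }
--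
--
-- def patch_path_separator(opsys, string):
--     # Single left-to-right scan: a doubled '//' is an escape for one literal
--     # '/', a lone '/' becomes the platform separator.
--     to_separator = platform_definitions[opsys]["separator"]
--     out = []
--     i = 0
--     n = len(string)
--     while i < n:
--         if string[i] == '/':
--             if i + 1 < n and string[i + 1] == '/':
--                 out.append('/')
--                 i += 2
--             else:
--                 out.append(to_separator)
--                 i += 1
--         else:
--             out.append(string[i])
--             i += 1
--     return ''.join(out)
-- ===== Notes on version B (the rewrite author's own statement) =====
-- stated objective: alternative
-- what changed: Replaces the split-on-'//' / per-piece replace / join pipeline with one left-to-right scan that decides at each character whether it starts an escaped '//', a lone '/', or an ordinary character.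
import Mathlib
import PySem

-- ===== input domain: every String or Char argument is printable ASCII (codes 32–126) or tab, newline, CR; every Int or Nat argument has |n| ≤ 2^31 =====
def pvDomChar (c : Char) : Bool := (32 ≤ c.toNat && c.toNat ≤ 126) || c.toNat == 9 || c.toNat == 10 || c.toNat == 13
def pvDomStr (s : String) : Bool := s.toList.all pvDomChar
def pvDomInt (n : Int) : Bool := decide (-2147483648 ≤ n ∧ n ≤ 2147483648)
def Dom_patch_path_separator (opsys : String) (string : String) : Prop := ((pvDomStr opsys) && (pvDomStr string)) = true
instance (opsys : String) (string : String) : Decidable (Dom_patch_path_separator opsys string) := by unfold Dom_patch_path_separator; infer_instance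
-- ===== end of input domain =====

-- B replaces A's split-on-"//" / per-piece replace / join pipeline by one left-to-right
-- scan deciding at each character between escaped '//', lone '/', or ordinary char (alternative decomposition, same cost).

-- ===== PORT A =====
-- the module-level platform_definitions dict
def pvPlatformDefinitions : PySem.Dict String (PySem.Dict String String) :=
  PySem.Dict.ofList
    [ ("linux",   PySem.Dict.ofList [("platform","linux"),  ("separator","/"),  ("define","-D"), ("include","-I")])
    , ("macos",   PySem.Dict.ofList [("platform","darwin"), ("separator","/"),  ("define","-D"), ("include","-I")])
    , ("windows", PySem.Dict.ofList [("platform","win32"),  ("separator","\\"), ("define","/D"), ("include","/I")]) ]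

def patch_path_separator (opsys : String) (string : String) : String :=
  let from_separator := "/"
  -- platform_definitions[opsys]["separator"]; a missing opsys key (KeyError) is excluded by Pre_
  let to_separator := ((pvPlatformDefinitions.get? opsys).getD PySem.Dict.empty).getD "separator" ""
  -- string.split('//'): sep is nonempty, so split? is always some
  PySem.Str.join from_separator
    (((PySem.Str.split? string (from_separator ++ from_separator)).getD []).map
      (fun escaped => PySem.Str.replace escaped from_separator to_separator))

-- ===== PORT B =====
-- the scan loop of Source B: output built left to right over the characters
def pvScan (sep : List Char) : List Char → List Char
  | [] => []
  | c :: rest =>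
    if c = '/' then
      if rest.head? = some '/' then '/' :: pvScan sep rest.tail
      else sep ++ pvScan sep rest
    else c :: pvScan sep rest
termination_by l => l.length
decreasing_by
  · cases rest <;> simp
  · simp
  · simp

def patch_path_separator_alt (opsys : String) (string : String) : String :=
  let to_separator := ((pvPlatformDefinitions.get? opsys).getD PySem.Dict.empty).getD "separator" ""
  String.ofList (pvScan to_separator.toList string.toList)

-- ===== PRECONDITION & SPEC =====
-- A raises KeyError when opsys is not a key of platform_definitions; exactly those inputs are excluded.
def Pre_patch_path_separator (opsys : String) (string : String) : Prop :=
  opsys = "linux" ∨ opsys = "macos" ∨ opsys = "windows"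
instance (opsys : String) (string : String) : Decidable (Pre_patch_path_separator opsys string) := by
  unfold Pre_patch_path_separator; infer_instance

def pvWitness_patch_path_separator : String × String := ("windows", "a//b/c")

def Spec_patch_path_separator (opsys : String) (string : String) (out : String) : Prop := out = patch_path_separator_alt opsys string
instance (opsys : String) (string : String) (out : String) : Decidable (Spec_patch_path_separator opsys string out) := by unfold Spec_patch_path_separator; infer_instance

-- ===== CLAIM (what is proved, stated in full; the proofs are below) =====
def Claim_equal_patch_path_separator : Prop := ∀ (opsys : String) (string : String), Dom_patch_path_separator opsys string → Pre_patch_path_separator opsys string → Spec_patch_path_separator opsys string (patch_path_separator opsys string)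

-- ===== LEMMAS AND PROOFS =====

-- clean model of str.split('//') on the fixed separator "//": (head piece, tail pieces)
def pvSplitSS : List Char → List Char × List (List Char)
  | [] => ([], [])
  | c :: t =>
    if c = '/' ∧ t.head? = some '/' then ([], (pvSplitSS t.tail).1 :: (pvSplitSS t.tail).2)
    else (c :: (pvSplitSS t).1, (pvSplitSS t).2)
termination_by l => l.length
decreasing_by
  · cases t <;> simp
  · simp

theorem pvPrefixSS_iff (c : Char) (t : List Char) :
    List.isPrefixOf ['/', '/'] (c :: t) = true ↔ (c = '/' ∧ t.head? = some '/') := by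
  cases t with
  | nil => simp [List.isPrefixOf]
  | cons d r =>
    simp only [List.isPrefixOf, Bool.and_eq_true, beq_iff_eq, List.head?_cons, Option.some.injEq]
    constructor
    · rintro ⟨a, b, -⟩; exact ⟨a.symm, b.symm⟩
    · rintro ⟨a, b⟩; exact ⟨a.symm, b.symm, trivial⟩

theorem pvSplitSS_nil : pvSplitSS [] = ([], []) := by
  rw [pvSplitSS.eq_def]

theorem pvSplitSS_esc (rest : List Char) :
    pvSplitSS ('/' :: '/' :: rest) = ([], (pvSplitSS rest).1 :: (pvSplitSS rest).2) := by
  rw [pvSplitSS.eq_def]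
  simp

theorem pvSplitSS_cons_ne (c : Char) (t : List Char)
    (h : ¬ (c = '/' ∧ t.head? = some '/')) :
    pvSplitSS (c :: t) = (c :: (pvSplitSS t).1, (pvSplitSS t).2) := by
  rw [pvSplitSS.eq_def]
  simp [h]

-- clean model of str.replace('/', sep)
def pvRepl (sep : List Char) (cs : List Char) : List Char :=
  cs.flatMap (fun c => if c = '/' then sep else [c])

theorem pvReplGo_eq (sep : List Char) :
    ∀ (fuel : Nat) (l acc : List Char), l.length ≤ fuel →
      PySem.Chars.replace.go ['/'] sep fuel l acc = acc.reverse ++ pvRepl sep l := by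
  intro fuel
  induction fuel with
  | zero =>
    intro l acc h
    have hl : l = [] := List.eq_nil_of_length_eq_zero (Nat.le_zero.mp h)
    subst hl; simp [PySem.Chars.replace.go, pvRepl]
  | succ n ih =>
    intro l acc h
    match l with
    | [] => simp [PySem.Chars.replace.go, pvRepl]
    | c :: t =>
      simp only [PySem.Chars.replace.go]
      by_cases hc : c = '/'
      · subst hc
        rw [if_pos (by rw [List.isPrefixOf_iff_prefix]; exact ⟨t, rfl⟩)]
        rw [ih (List.drop ['/'].length ('/' :: t)) (sep.reverse ++ acc)
          (by simpa using Nat.le_of_succ_le_succ h)]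
        simp [pvRepl]
      · rw [if_neg (by rw [List.isPrefixOf_iff_prefix, List.cons_prefix_cons]; rintro ⟨h1, -⟩; exact hc h1.symm)]
        rw [ih t (c :: acc) (Nat.le_of_succ_le_succ h)]
        simp [pvRepl, hc]

theorem pvRepl_eq (sep cs : List Char) :
    PySem.Chars.replace cs ['/'] sep = pvRepl sep cs := by
  simp only [PySem.Chars.replace, List.isEmpty]
  rw [pvReplGo_eq sep cs.length cs [] (le_refl _)]
  simp

theorem pvSplitGo_eq :
    ∀ (fuel : Nat) (l cur : List Char) (acc : List (List Char)), l.length < fuel →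
      PySem.Chars.splitOn.go ['/', '/'] fuel l cur acc =
        acc.reverse ++ ((cur.reverse ++ (pvSplitSS l).1) :: (pvSplitSS l).2) := by
  intro fuel
  induction fuel with
  | zero => intro l cur acc h; omega
  | succ n ih =>
    intro l cur acc h
    match l with
    | [] => simp [PySem.Chars.splitOn.go, pvSplitSS_nil]
    | c :: t =>
      simp only [PySem.Chars.splitOn.go]
      by_cases hc : c = '/' ∧ t.head? = some '/'
      · obtain ⟨hc1, hc2⟩ := hc
        subst hc1
        cases t with
        | nil => simp at hc2
        | cons d r =>
          have hd : d = '/' := by simpa using hc2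
          subst hd
          rw [if_pos (by rw [List.isPrefixOf_iff_prefix]; exact ⟨r, rfl⟩)]
          rw [ih (List.drop ['/', '/'].length ('/' :: '/' :: r)) [] (cur.reverse :: acc)
            (by simp at h ⊢; omega)]
          rw [pvSplitSS_esc]
          simp
      · rw [if_neg (by rw [pvPrefixSS_iff]; exact hc)]
        rw [ih t (c :: cur) acc (by simp at h ⊢; omega)]
        rw [pvSplitSS_cons_ne c t hc]
        simp

theorem pvSplitOn_eq (cs : List Char) :
    PySem.Chars.splitOn cs ['/', '/'] = (pvSplitSS cs).1 :: (pvSplitSS cs).2 := by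
  simp only [PySem.Chars.splitOn]
  rw [pvSplitGo_eq (cs.length + 1) cs [] [] (Nat.lt_succ_self _)]
  simp

theorem pvJoin_cons_append (a p : List Char) (ps : List (List Char)) :
    PySem.Chars.join ['/'] ((a ++ p) :: ps) = a ++ PySem.Chars.join ['/'] (p :: ps) := by
  cases ps <;> simp [PySem.Chars.join, List.intercalate, List.intersperse]

theorem pvJoin_nil_cons (p : List Char) (ps : List (List Char)) :
    PySem.Chars.join ['/'] ([] :: p :: ps) = '/' :: PySem.Chars.join ['/'] (p :: ps) := by
  simp [PySem.Chars.join, List.intercalate, List.intersperse]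

theorem pvScan_nil (sep : List Char) : pvScan sep [] = [] := by
  rw [pvScan.eq_def]

theorem pvScan_esc (sep rest : List Char) :
    pvScan sep ('/' :: '/' :: rest) = '/' :: pvScan sep rest := by
  rw [pvScan.eq_def]
  simp

theorem pvScan_slash (sep rest : List Char) (h : rest.head? ≠ some '/') :
    pvScan sep ('/' :: rest) = sep ++ pvScan sep rest := by
  rw [pvScan.eq_def]
  simp [h]

theorem pvScan_cons_ne (sep : List Char) (c : Char) (rest : List Char) (h : c ≠ '/') :
    pvScan sep (c :: rest) = c :: pvScan sep rest := by
  rw [pvScan.eq_def]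
  simp [h]

theorem pvMain (sep : List Char) (cs : List Char) :
    PySem.Chars.join ['/'] (((pvSplitSS cs).1 :: (pvSplitSS cs).2).map (pvRepl sep)) =
      pvScan sep cs := by
  induction cs using pvScan.induct with
  | case1 =>
    rw [pvSplitSS_nil, pvScan_nil]
    simp [pvRepl, PySem.Chars.join, List.intercalate]
  | case2 rest hh ih =>
    cases rest with
    | nil => simp at hh
    | cons d r =>
      have hd : d = '/' := by simpa using hh
      subst hd
      rw [pvSplitSS_esc, pvScan_esc]
      simp only [List.map]
      have h0 : pvRepl sep [] = [] := rfl
      rw [h0, pvJoin_nil_cons]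
      simp only [List.map, List.tail] at ih
      rw [ih]
  | case3 rest hh ih =>
    rw [pvSplitSS_cons_ne '/' rest (by simp [hh])]
    simp only [List.map]
    have hr : pvRepl sep ('/' :: (pvSplitSS rest).1) = sep ++ pvRepl sep (pvSplitSS rest).1 := by
      simp [pvRepl]
    rw [hr, pvJoin_cons_append]
    simp only [List.map] at ih
    rw [ih, pvScan_slash sep rest hh]
  | case4 c rest hc ih =>
    rw [pvSplitSS_cons_ne c rest (by simp [hc])]
    simp only [List.map]
    have hr : pvRepl sep (c :: (pvSplitSS rest).1) = [c] ++ pvRepl sep (pvSplitSS rest).1 := by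
      simp [pvRepl, hc]
    rw [hr, pvJoin_cons_append]
    simp only [List.map] at ih
    rw [ih, pvScan_cons_ne sep c rest hc]
    rfl

theorem pvChars_chain (sep : String) (cs : List Char) :
    PySem.Chars.join ['/']
      (List.map String.toList
        ((List.map String.ofList (PySem.Chars.splitOn cs ['/', '/'])).map
          (fun e => PySem.Str.replace e "/" sep))) = pvScan sep.toList cs := by
  rw [pvSplitOn_eq]
  have hmap : ∀ ps : List (List Char),
      List.map String.toList ((List.map String.ofList ps).map (fun e => PySem.Str.replace e "/" sep))
        = ps.map (pvRepl sep.toList) := by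
    intro ps
    simp only [List.map_map]
    apply List.map_congr_left
    intro p _
    simp [Function.comp, PySem.Str.toList_replace, pvRepl_eq]
  rw [hmap, pvMain]

theorem pvTop (opsys string : String) (h : Pre_patch_path_separator opsys string) :
    patch_path_separator opsys string = patch_path_separator_alt opsys string := by
  unfold patch_path_separator patch_path_separator_alt
  apply String.toList_injective
  rw [PySem.Str.toList_join]
  have hsplit : PySem.Str.split? string "//" =
      some (List.map String.ofList (PySem.Chars.splitOn string.toList ['/', '/'])) := by
    simp [PySem.Str.split?, PySem.Chars.split?]
  rcases h with h | h | h <;> subst h <;>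
    · rw [show ("/" : String) ++ "/" = "//" from rfl, hsplit]
      simpa using pvChars_chain _ string.toList

-- ===== VERDICT (by name: the statement is the Claim_ definition above) =====
theorem patch_path_separator_spec : Claim_equal_patch_path_separator := by
  intro opsys string _ hpre
  unfold Spec_patch_path_separator
  exact pvTop opsys string hpre
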